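-- pv_equiv track=rewrite | github.com/1stVagon/codewars | Quarter of the year/solution.py | quarter_of
-- ===== SOURCE A (Python) =====
-- def quarter_of(month):
--     monthsByQuarter = {
--         1: [3, 1, 2],
--         2: [6, 4, 5],
--         3: [9, 7, 8],
--         4: [12, 10, 11]
--       }
--
--     for season in monthsByQuarter:
--         if month in monthsByQuarter[season]:
--             return season
-- ===== SOURCE B (Python) =====
-- def quarter_of(month):
--     if 1 <= month <= 12:
--         return (month - 1) // 3 + 1
-- ===== Notes on version B (the rewrite author's own statement) =====
-- stated objective: simpler
-- what changed: Replaces the quarter->months dictionary and the linear scan with the closed-form arithmetic (month-1)//3+1 behind a 1..12 range guard.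
import Mathlib
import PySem

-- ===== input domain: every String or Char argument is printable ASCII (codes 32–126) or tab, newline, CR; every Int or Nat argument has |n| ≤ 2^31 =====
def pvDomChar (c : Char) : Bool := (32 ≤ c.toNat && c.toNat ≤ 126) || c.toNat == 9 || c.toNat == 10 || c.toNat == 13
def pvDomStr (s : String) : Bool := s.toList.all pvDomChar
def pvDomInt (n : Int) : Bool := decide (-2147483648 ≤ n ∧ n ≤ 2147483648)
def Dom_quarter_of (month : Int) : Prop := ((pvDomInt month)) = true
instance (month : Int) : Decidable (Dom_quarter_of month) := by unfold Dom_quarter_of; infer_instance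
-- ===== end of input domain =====

-- B replaces A's dictionary scan with the closed form (month-1)//3+1; return-value equivalence on months 1..12.

-- ===== PORT A =====
-- A scans the quarter->months dict in insertion order and returns the first key
-- whose list contains `month`; on no match Python returns None (excluded by
-- Pre_; the port's .getD 0 is never reached inside Pre_).
def quarter_of (month : Int) : Int :=
  let monthsByQuarter : PySem.Dict Int (List Int) :=
    ((((PySem.Dict.empty).insert 1 [3, 1, 2]).insert 2 [6, 4, 5]).insert 3 [9, 7, 8]).insert 4 [12, 10, 11]
  (monthsByQuarter.items.foldl
    (fun acc p =>
      acc.orElse (fun _ => if p.2.contains month then some p.1 else none))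
    none).getD 0

-- ===== PORT B =====
-- B: closed form; out of range Python B returns None (excluded by Pre_; the
-- port's else-0 is never reached inside Pre_).
def quarter_of_alt (month : Int) : Int :=
  if 1 ≤ month ∧ month ≤ 12 then PySem.Int.floordiv (month - 1) 3 + 1 else 0

-- ===== PRECONDITION & SPEC =====
-- Pre_ excludes months outside 1..12, where A falls off the loop and returns None, not an int.
def Pre_quarter_of (month : Int) : Prop := 0 < month ∧ month < 13
instance (month : Int) : Decidable (Pre_quarter_of month) := by unfold Pre_quarter_of; infer_instance
def pvWitness_quarter_of : Int := 7

def Spec_quarter_of (month : Int) (out : Int) : Prop := out = quarter_of_alt month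
instance (month : Int) (out : Int) : Decidable (Spec_quarter_of month out) := by unfold Spec_quarter_of; infer_instance

-- ===== CLAIM (what is proved, stated in full; the proofs are below) =====
def Claim_equal_quarter_of : Prop := ∀ (month : Int), Dom_quarter_of month → Pre_quarter_of month → Spec_quarter_of month (quarter_of month)

-- ===== LEMMAS AND PROOFS =====

-- ===== VERDICT (by name: the statement is the Claim_ definition above) =====
theorem quarter_of_spec : Claim_equal_quarter_of := by
  intro month _ hpre
  obtain ⟨h1, h2⟩ := hpre
  unfold Spec_quarter_of
  interval_cases month <;> decide
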